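-- pv_equiv track=rewrite | github.com/McGill-NLP/length-generalization | src/tests/test_all_scratchpad_datasets.py | generate_all_scratchpad_configs
-- ===== SOURCE A (Python) =====
-- from typing import List, Any, Dict
--
-- def modify_array(arr: List[Any], idx: int, val: Any) -> List[Any]:
--     arr[idx] = val
--     return arr
--
-- def generate_all_scratchpad_configs(ds_name, split_name) -> List[Dict[str, Any]]:
--     configs = []
--     for include_scratchpad in [True, False]:
--         if not include_scratchpad:
--             configs.append({"include_scratchpad": include_scratchpad})
--             continue
--
--         scratchpad_bool_config = [
--             True,  # include_input
--             True,  # include_computation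
--             True,  # include_output
--             True,  # include_intermediate_variables
--             True,  # include_remaining_input
--         ]
--         all_bool_configs = [
--             scratchpad_bool_config.copy(),
--             # [
--             #     False,  # include_input
--             #     True,  # include_computation
--             #     False,  # include_output
--             #     False,  # include_intermediate_variables
--             #     False,  # include_remaining_input
--             # ],
--         ]
--         # ] + generate_boolean_configs(scratchpad_bool_config)
--
--         if ds_name in ["s2s_sort", "s2s_lego"]:
--             # Don't include intermediate variables for sort
--             all_bool_configs = [modify_array(c, 3, False) for c in all_bool_configs]
--
--         # Make the configs unique by converting each to tuple
--         # and then the list of configs to a set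
--         all_bool_configs = [tuple(c) for c in all_bool_configs]
--         all_bool_configs = sorted(set(all_bool_configs))
--
--         for config in all_bool_configs:
--             configs.append(
--                 {
--                     "include_scratchpad": include_scratchpad,
--                     "include_input": config[0],
--                     "include_computation": config[1],
--                     "include_output": config[2],
--                     "include_intermediate_variables": config[3],
--                     "include_remaining_input": config[4],
--                 }
--             )
--
--     return configs
-- ===== SOURCE B (Python) =====
-- def generate_all_scratchpad_configs(ds_name, split_name):
--     include_intermediate_variables = ds_name not in ("s2s_sort", "s2s_lego")
--     return [
--         {
--             "include_scratchpad": True,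
--             "include_input": True,
--             "include_computation": True,
--             "include_output": True,
--             "include_intermediate_variables": include_intermediate_variables,
--             "include_remaining_input": True,
--         },
--         {"include_scratchpad": False},
--     ]
-- ===== Notes on version B (the rewrite author's own statement) =====
-- stated objective: simpler
-- what changed: Replaced the loop over [True, False], the single-element list copy/modify_array mutation, tuple conversion and sorted(set()) dedup with a direct two-element literal list whose only computed value is the include_intermediate_variables flag.
import Mathlib
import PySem

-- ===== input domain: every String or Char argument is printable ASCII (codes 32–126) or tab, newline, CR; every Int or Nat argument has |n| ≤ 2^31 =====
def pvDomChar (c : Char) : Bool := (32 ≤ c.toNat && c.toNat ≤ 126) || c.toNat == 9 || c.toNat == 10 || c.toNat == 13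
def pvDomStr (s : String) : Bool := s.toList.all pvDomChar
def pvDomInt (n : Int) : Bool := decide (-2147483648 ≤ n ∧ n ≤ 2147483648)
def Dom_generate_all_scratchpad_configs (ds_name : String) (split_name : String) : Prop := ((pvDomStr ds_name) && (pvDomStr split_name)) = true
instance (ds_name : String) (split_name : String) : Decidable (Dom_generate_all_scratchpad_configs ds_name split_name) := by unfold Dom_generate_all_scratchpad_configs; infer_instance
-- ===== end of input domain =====

-- B replaces A's loop/mutation/dedup machinery (all acting on a one-element list) with a
-- direct two-element literal list; only the include_intermediate_variables flag is computed.

-- ===== PORT A =====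
-- modify_array(arr, idx, val): arr[idx] = val; return arr
def pvModifyArray (arr : List Bool) (idx : Nat) (val : Bool) : List Bool := arr.set idx val

-- Python's lexicographic tuple comparison on booleans (False < True); exact for bool tuples
-- of equal length, which is all A ever compares.
def pvTupleLe : List Bool → List Bool → Bool
  | [], _ => true
  | _ :: _, [] => false
  | a :: as, b :: bs => if a = b then pvTupleLe as bs else (!a && b)

-- insertion sort by pvTupleLe; port of Python's sorted() (exact: inputs are duplicate-free
-- after set(), so any stable sort of any input order yields the same result)
def pvInsert (x : List Bool) : List (List Bool) → List (List Bool)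
  | [] => [x]
  | y :: ys => if pvTupleLe x y then x :: y :: ys else y :: pvInsert x ys

def pvSort : List (List Bool) → List (List Bool)
  | [] => []
  | x :: xs => pvInsert x (pvSort xs)

def generate_all_scratchpad_configs (ds_name : String) (split_name : String) : List (List (String × Bool)) :=
  List.foldl (fun configs include_scratchpad =>
    if !include_scratchpad then
      configs ++ [[("include_scratchpad", include_scratchpad)]]
    else
      let scratchpad_bool_config : List Bool := [true, true, true, true, true]
      let all_bool_configs := [scratchpad_bool_config]
      let all_bool_configs :=
        if ds_name = "s2s_sort" ∨ ds_name = "s2s_lego" then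
          all_bool_configs.map (fun c => pvModifyArray c 3 false)
        else all_bool_configs
      let all_bool_configs := pvSort (PySem.Set.ofList all_bool_configs)
      List.foldl (fun cfgs config =>
        cfgs ++ [[("include_scratchpad", include_scratchpad),
                  ("include_input", config.getD 0 false),      -- config[0]; exact: configs have length 5
                  ("include_computation", config.getD 1 false),
                  ("include_output", config.getD 2 false),
                  ("include_intermediate_variables", config.getD 3 false),
                  ("include_remaining_input", config.getD 4 false)]]) configs all_bool_configs)
    [] [true, false]

-- ===== PORT B =====
def generate_all_scratchpad_configs_alt (ds_name : String) (split_name : String) : List (List (String × Bool)) :=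
  let include_intermediate_variables := !(ds_name == "s2s_sort" || ds_name == "s2s_lego")
  [[("include_scratchpad", true),
    ("include_input", true),
    ("include_computation", true),
    ("include_output", true),
    ("include_intermediate_variables", include_intermediate_variables),
    ("include_remaining_input", true)],
   [("include_scratchpad", false)]]

-- ===== PRECONDITION & SPEC =====
def Spec_generate_all_scratchpad_configs (ds_name : String) (split_name : String) (out : List (List (String × Bool))) : Prop := out = generate_all_scratchpad_configs_alt ds_name split_name
instance (ds_name : String) (split_name : String) (out : List (List (String × Bool))) : Decidable (Spec_generate_all_scratchpad_configs ds_name split_name out) := by unfold Spec_generate_all_scratchpad_configs; infer_instance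

-- ===== CLAIM (what is proved, stated in full; the proofs are below) =====
def Claim_equal_generate_all_scratchpad_configs : Prop := ∀ (ds_name : String) (split_name : String), Dom_generate_all_scratchpad_configs ds_name split_name → Spec_generate_all_scratchpad_configs ds_name split_name (generate_all_scratchpad_configs ds_name split_name)

-- ===== LEMMAS AND PROOFS =====

-- ===== VERDICT (by name: the statement is the Claim_ definition above) =====
theorem generate_all_scratchpad_configs_spec : Claim_equal_generate_all_scratchpad_configs := by
  intro ds sp _
  unfold Spec_generate_all_scratchpad_configs
  by_cases h1 : ds = "s2s_sort" <;> by_cases h2 : ds = "s2s_lego" <;>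
    simp [generate_all_scratchpad_configs, generate_all_scratchpad_configs_alt,
      pvSort, pvInsert, pvModifyArray, PySem.Set.ofList, h1, h2]
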